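-- pv_equiv track=rewrite | github.com/MrBrantCode/unitest_baseline | mut_generate/mist_train_taco/taco_11843/solution.py | count_controlled_villages
-- ===== SOURCE A (Python) =====
-- def count_controlled_villages(s: str) -> tuple[int, int]:
--     count_A = 0
--     count_B = 0
--     consecutive_empty = 0
--     last_tribe = ''
--
--     for village in s:
--         if village == '.':
--             consecutive_empty += 1
--         else:
--             if village != last_tribe:
--                 consecutive_empty = 1
--             if village == 'A':
--                 count_A += consecutive_empty
--             else:
--                 count_B += consecutive_empty
--             last_tribe = village
--             consecutive_empty = 1
--
--     return count_A, count_B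
-- ===== SOURCE B (Python) =====
-- def count_controlled_villages(s: str) -> tuple[int, int]:
--     n = len(s)
--     # pass 1: nearest tribe letter at or to the left of each position
--     left = [None] * n
--     last = None
--     for i in range(n):
--         if s[i] != '.':
--             last = s[i]
--         left[i] = last
--     # pass 2: nearest tribe letter at or to the right of each position
--     right = [None] * n
--     nxt = None
--     for i in range(n - 1, -1, -1):
--         if s[i] != '.':
--             nxt = s[i]
--         right[i] = nxt
--     # pass 3: a letter controls itself; a dot is controlled iff it lies
--     # between two equal letters
--     count_A = 0
--     count_B = 0
--     for i in range(n):
--         c = s[i]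
--         if c != '.':
--             owner = c
--         elif left[i] is not None and left[i] == right[i]:
--             owner = left[i]
--         else:
--             continue
--         if owner == 'A':
--             count_A += 1
--         else:
--             count_B += 1
--     return count_A, count_B
-- ===== Notes on version B (the rewrite author's own statement) =====
-- stated objective: alternative
-- what changed: Replaces A's single-pass counter-and-last-tribe state machine with three staged passes: a forward pass recording the nearest letter to the left of each position, a backward pass recording the nearest letter to the right, and a final pass that counts each letter for its own tribe and each dot iff its two neighbouring letters are equal.
import Mathlib
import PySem

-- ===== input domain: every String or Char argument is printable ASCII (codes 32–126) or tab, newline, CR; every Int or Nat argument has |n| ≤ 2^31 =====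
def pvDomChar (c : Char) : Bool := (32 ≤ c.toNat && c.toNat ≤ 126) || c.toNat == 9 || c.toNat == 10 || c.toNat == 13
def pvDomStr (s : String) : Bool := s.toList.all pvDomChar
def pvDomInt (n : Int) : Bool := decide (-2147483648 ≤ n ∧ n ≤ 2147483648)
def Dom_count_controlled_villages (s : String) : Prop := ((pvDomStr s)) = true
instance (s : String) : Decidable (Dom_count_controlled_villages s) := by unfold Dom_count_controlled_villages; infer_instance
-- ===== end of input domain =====

-- B replaces A's single-pass dot-counter state machine by three staged passes:
-- nearest letter to the left, nearest letter to the right, then a per-position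
-- classification (a dot counts iff it lies between two equal letters); objective: alternative.

-- ===== PORT A =====
-- A's loop body; last_tribe is Python's string '', modelled as Option Char
-- (the empty string never equals a one-character village, exactly like none ≠ some v).
def pvAStep (st : Int × Int × Int × Option Char) (v : Char) : Int × Int × Int × Option Char :=
  if v = '.' then (st.1, st.2.1, st.2.2.1 + 1, st.2.2.2)
  else
    let ce : Int := if some v ≠ st.2.2.2 then 1 else st.2.2.1
    if v = 'A' then (st.1 + ce, st.2.1, 1, some v)
    else (st.1, st.2.1 + ce, 1, some v)

def count_controlled_villages (s : String) : Int × Int :=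
  let st := s.toList.foldl pvAStep (0, 0, 0, none)
  (st.1, st.2.1)

-- ===== PORT B =====
-- pass 1: nearest letter at/left of each position (Python's forward loop over i)
def pvLeftGo : Option Char → List Char → List (Option Char)
  | _, [] => []
  | last, c :: t =>
    let last' : Option Char := if c ≠ '.' then some c else last
    last' :: pvLeftGo last' t

-- pass 2: nearest letter at/right of each position (Python's reversed loop),
-- structural recursion returning (right-list, running nxt)
def pvRightGo : List Char → List (Option Char) × Option Char
  | [] => ([], none)
  | c :: t =>
    let r := pvRightGo t
    let nxt : Option Char := if c ≠ '.' then some c else r.2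
    (nxt :: r.1, nxt)

-- pass 3: per-position classification
def pvBStep (st : Int × Int) (x : Char × Option Char × Option Char) : Int × Int :=
  let owner : Option Char :=
    if x.1 ≠ '.' then some x.1
    else match x.2.1, x.2.2 with
      | some l, some r => if l = r then some l else none
      | _, _ => none
  match owner with
  | some c => if c = 'A' then (st.1 + 1, st.2) else (st.1, st.2 + 1)
  | none => st

def count_controlled_villages_alt (s : String) : Int × Int :=
  let l := s.toList
  let left := pvLeftGo none l
  let right := (pvRightGo l).1
  (l.zip (left.zip right)).foldl pvBStep (0, 0)

-- ===== PRECONDITION & SPEC =====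
def Spec_count_controlled_villages (s : String) (out : Int × Int) : Prop := out = count_controlled_villages_alt s
instance (s : String) (out : Int × Int) : Decidable (Spec_count_controlled_villages s out) := by unfold Spec_count_controlled_villages; infer_instance

-- ===== CLAIM (what is proved, stated in full; the proofs are below) =====
def Claim_equal_count_controlled_villages : Prop := ∀ (s : String), Dom_count_controlled_villages s → Spec_count_controlled_villages s (count_controlled_villages s)

-- ===== LEMMAS AND PROOFS =====

-- abstract count matching A's semantics: suffix, previous letter, pending weight
def pvCnt : List Char → Option Char → Int → Int × Int
  | [], _, _ => (0, 0)
  | c :: t, p, w =>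
    if c = '.' then pvCnt t p (w + 1)
    else
      let add : Int := if some c = p then w else 1
      let rest := pvCnt t (some c) 1
      if c = 'A' then (add + rest.1, rest.2) else (rest.1, add + rest.2)

-- first letter of a suffix
def pvFL : List Char → Option Char
  | [] => none
  | c :: t => if c = '.' then pvFL t else some c

-- correction term for pending dots that B has not yet charged
def pvExtra : Option Char → Option Char → Int → Int × Int
  | some c, some d, w => if c = d then (if c = 'A' then (w, 0) else (0, w)) else (0, 0)
  | _, _, _ => (0, 0)

theorem pvRightGo_snd : ∀ l : List Char, (pvRightGo l).2 = pvFL l := by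
  intro l; induction l with
  | nil => rfl
  | cons c t ih => by_cases h : c = '.' <;> simp [pvRightGo, pvFL, h, ih]

theorem pvExtra_zero (p q : Option Char) : pvExtra p q 0 = (0, 0) := by
  cases p <;> cases q <;> simp [pvExtra] <;> split <;> split <;> rfl

-- A's fold computes pvCnt
theorem pvA_foldl : ∀ (l : List Char) (a b w : Int) (p : Option Char),
    ((l.foldl pvAStep (a, b, w, p)).1, (l.foldl pvAStep (a, b, w, p)).2.1)
      = (a, b) + pvCnt l p w := by
  intro l
  induction l with
  | nil => intro a b w p; simp [pvCnt]
  | cons c t ih =>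
    intro a b w p
    by_cases hd : c = '.'
    · subst hd; simp [pvAStep, pvCnt, ih]
    · by_cases hp : some c = p
      · by_cases hA : c = 'A' <;>
          simp [pvAStep, pvCnt, hd, hp, hA, ih, Prod.ext_iff] <;> ring_nf <;> omega
      · by_cases hA : c = 'A' <;>
          simp [pvAStep, pvCnt, hd, hp, hA, Ne.symm hp, ih, Prod.ext_iff] <;> ring_nf <;> omega

-- pvBStep is additive in its accumulator
theorem pvB_shift : ∀ (L : List (Char × Option Char × Option Char)) (st : Int × Int),
    L.foldl pvBStep st = st + L.foldl pvBStep (0, 0) := by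
  intro L
  induction L with
  | nil => intro st; simp
  | cons x T ih =>
    intro st
    rw [List.foldl_cons, List.foldl_cons, ih (pvBStep st x), ih (pvBStep (0,0) x)]
    have : pvBStep st x = st + pvBStep (0, 0) x := by
      unfold pvBStep
      rcases st with ⟨a, b⟩
      cases h : (if x.1 ≠ '.' then some x.1
        else match x.2.1, x.2.2 with
          | some l, some r => if l = r then some l else none
          | _, _ => none) with
      | none => simp
      | some c => by_cases hA : c = 'A' <;> simp [hA, Prod.ext_iff]
    rw [this]; ring

-- B's staged passes compute pvCnt up to the pending-dot correction
theorem pvB_main : ∀ (l : List Char) (p : Option Char) (w : Int),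
    pvCnt l p w
      = (l.zip ((pvLeftGo p l).zip (pvRightGo l).1)).foldl pvBStep (0, 0)
        + pvExtra p (pvFL l) (w - 1) := by
  intro l
  induction l with
  | nil =>
    intro p w
    cases p <;> simp [pvCnt, pvFL, pvExtra, pvLeftGo, pvRightGo, Prod.ext_iff]
  | cons c t ih =>
    intro p w
    by_cases hd : c = '.'
    · subst hd
      have hstep : pvBStep (0, 0) ('.', p, pvFL t) = pvExtra p (pvFL t) 1 := by
        cases p with
        | none => simp [pvBStep, pvExtra]
        | some cp =>
          cases hq : pvFL t with
          | none => simp [pvBStep, pvExtra]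
          | some d =>
            by_cases hcd : cp = d
            · subst hcd; by_cases hA : cp = 'A' <;> simp [pvBStep, pvExtra, hA]
            · simp [pvBStep, pvExtra, hcd]
      have hx : pvExtra p (pvFL t) 1 + pvExtra p (pvFL t) (w - 1)
          = pvExtra p (pvFL t) w := by
        cases p with
        | none => simp [pvExtra]
        | some cp =>
          cases pvFL t with
          | none => simp [pvExtra]
          | some d =>
            by_cases hcd : cp = d
            · subst hcd; by_cases hA : cp = 'A' <;>
                simp [pvExtra, hA, Prod.ext_iff] <;> ring
            · simp [pvExtra, hcd]
      have hne : ¬(('.' : Char) ≠ '.') := by simp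
      simp only [pvCnt, pvFL, pvLeftGo, pvRightGo, reduceIte, if_neg hne,
        List.zip_cons_cons, List.foldl_cons, pvRightGo_snd]
      rw [pvB_shift _ (pvBStep (0, 0) ('.', p, pvFL t)), hstep, ih p (w + 1)]
      have h1 : w + 1 - 1 = w := by ring
      rw [h1, ← hx]; ring
    · have hF : pvCnt t (some c) 1
          = (t.zip ((pvLeftGo (some c) t).zip (pvRightGo t).1)).foldl pvBStep (0, 0) := by
        rw [ih (some c) 1, show (1 : Int) - 1 = 0 from by ring, pvExtra_zero]
        simp
      have key : ∀ (F : Int × Int),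
          (if c = 'A'
            then ((if some c = p then w else 1) + F.1, F.2)
            else (F.1, (if some c = p then w else 1) + F.2))
          = pvBStep (0, 0) (c, some c, some c) + F + pvExtra p (some c) (w - 1) := by
        intro F
        rcases p with _ | d
        · by_cases hA : c = 'A' <;>
            simp [pvBStep, pvExtra, hd, hA, Prod.ext_iff] <;> ring
        · by_cases hdc : d = c
          · subst hdc
            by_cases hA : d = 'A'
            · simp [pvBStep, pvExtra, hd, hA, Prod.ext_iff]; ring
            · simp [pvBStep, pvExtra, hd, hA, Prod.ext_iff]; ring
          · have hcd : ¬ c = d := fun h => hdc h.symm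
            by_cases hA : c = 'A'
            · subst hA
              simp [pvBStep, pvExtra, hd, hdc, hcd, Prod.ext_iff]
            · simp [pvBStep, pvExtra, hd, hA, hdc, hcd, Prod.ext_iff]
      simp only [pvCnt, pvFL, pvLeftGo, pvRightGo, if_neg hd, if_pos hd,
        List.zip_cons_cons, List.foldl_cons]
      rw [pvB_shift _ (pvBStep (0, 0) (c, some c, some c)), ← hF]
      exact key (pvCnt t (some c) 1)

-- ===== VERDICT (by name: the statement is the Claim_ definition above) =====
theorem count_controlled_villages_spec : Claim_equal_count_controlled_villages := by
  intro s _
  unfold Spec_count_controlled_villages count_controlled_villages count_controlled_villages_alt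
  have hA := pvA_foldl s.toList 0 0 0 none
  have hB := pvB_main s.toList none 0
  simp only [pvExtra] at hB
  rw [hA, hB]
  rw [show ((0 : Int), (0 : Int)) = (0 : Int × Int) from rfl]
  simp
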